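-- pv_equiv track=rewrite | github.com/alexistran/Coding-Challenge-Practice | TwinStrings.py | twins
-- ===== SOURCE A (Python) =====
-- def get_count(s):
--     counts = {}
--     for c in s:
--         if c in counts:
--             counts[c] += 1
--         else:
--             counts[c] = 1
--     return counts
--
-- def get_counts(s):
--     return (get_count(s[::2]), get_count(s[1::2]))
--
-- def twins(a, b):
--     returnedArray = []
--     counter = 0
--     for i in a:
--         if len(a) != len(b) and counter == min(len(a), len(b)):
--             for i in range(0, abs(len(a) - len(b))):
--                 returnedArray.append("No")
--             return returnedArray
--         elif get_counts(a[counter]) == get_counts(b[counter]):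
--             returnedArray.append("Yes")
--         else:
--             returnedArray.append("No")
--         counter += 1
--     return returnedArray
-- ===== SOURCE B (Python) =====
-- def twins(a, b):
--     def twin(x, y):
--         return sorted(x[::2]) == sorted(y[::2]) and sorted(x[1::2]) == sorted(y[1::2])
--     return ["Yes" if i < len(b) and twin(a[i], b[i]) else "No" for i in range(len(a))]
-- ===== Notes on version B (the rewrite author's own statement) =====
-- stated objective: idiomatic
-- what changed: Replaces the counter loop with an early length-mismatch bail-out by a single comprehension of length len(a) guarded by i < len(b), and replaces the per-pair character-count-dictionary comparison by comparing the sorted even-index and odd-index slices (multiset comparison by sorting).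
import Mathlib
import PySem

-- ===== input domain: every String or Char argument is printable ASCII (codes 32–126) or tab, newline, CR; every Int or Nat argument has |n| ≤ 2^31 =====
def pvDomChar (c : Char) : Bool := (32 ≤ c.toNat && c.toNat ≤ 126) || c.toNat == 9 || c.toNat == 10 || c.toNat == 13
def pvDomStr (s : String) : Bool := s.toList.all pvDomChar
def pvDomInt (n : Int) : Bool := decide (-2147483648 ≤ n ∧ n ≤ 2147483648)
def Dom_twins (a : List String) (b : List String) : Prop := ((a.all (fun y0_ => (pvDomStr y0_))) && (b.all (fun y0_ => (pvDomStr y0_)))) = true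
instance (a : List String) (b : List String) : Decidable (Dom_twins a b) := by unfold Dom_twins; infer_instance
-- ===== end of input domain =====

-- B replaces A's counter loop with early length-mismatch return by a direct comprehension of
-- length len(a) with an i < len(b) guard, and the character-count-dict comparison by a
-- sorted-slice (multiset) comparison: idiomatic, same return value on every input.

-- shared helper: s[::2] resp. s[1::2] on a string's characters (step 2 ≠ 0, so slice? is
-- always `some`; the `.getD []` default is never taken)
def pvEvens (s : String) : List Char := (PySem.List.slice? s.toList none none 2).getD []
def pvOdds (s : String) : List Char := (PySem.List.slice? s.toList (some 1) none 2).getD []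

-- ===== PORT A =====
def get_count (s : List Char) : PySem.Dict Char Int :=
  s.foldl (fun counts c =>
      if counts.contains c then counts.insert c (counts.getD c 0 + 1)
      else counts.insert c 1)
    PySem.Dict.empty

def get_counts (s : String) : PySem.Dict Char Int × PySem.Dict Char Int :=
  (get_count (pvEvens s), get_count (pvOdds s))

-- Python's dict `==` is mapping equality (insertion order ignored): same keys, same values
def pvDictEq (d1 d2 : PySem.Dict Char Int) : Bool :=
  d1.keys.all (fun k => d2.get? k == d1.get? k) && d2.keys.all (fun k => d1.get? k == d2.get? k)

-- Python's tuple `==` on the pairs returned by get_counts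
def pvCountsEq (p q : PySem.Dict Char Int × PySem.Dict Char Int) : Bool :=
  pvDictEq p.1 q.1 && pvDictEq p.2 q.2

-- A's loop over `a` with `returnedArray`/`counter`; a[counter]/b[counter] are always in range
-- when accessed (established in the proofs), so `.getD counter ""` is exact
def twinsGo (a b : List String) : List String → List String → Nat → List String
  | [], arr, _ => arr
  | _ :: t, arr, counter =>
    if a.length ≠ b.length ∧ counter = min a.length b.length then
      (PySem.List.pyRange 0 ((a.length : Int) - (b.length : Int)).natAbs 1).foldl
        (fun r _ => r ++ ["No"]) arr
    else if pvCountsEq (get_counts (a.getD counter "")) (get_counts (b.getD counter "")) then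
      twinsGo a b t (arr ++ ["Yes"]) (counter + 1)
    else
      twinsGo a b t (arr ++ ["No"]) (counter + 1)

def twins (a : List String) (b : List String) : List String :=
  twinsGo a b a [] 0

-- ===== PORT B =====
-- sorted(x[::2]) == sorted(y[::2]) and sorted(x[1::2]) == sorted(y[1::2])
def twinEq (x y : String) : Bool :=
  (PySem.List.sorted (pvEvens x) (fun c => c) false == PySem.List.sorted (pvEvens y) (fun c => c) false)
    && (PySem.List.sorted (pvOdds x) (fun c => c) false == PySem.List.sorted (pvOdds y) (fun c => c) false)

def twins_alt (a : List String) (b : List String) : List String :=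
  (List.range a.length).map (fun i =>
    if decide (i < b.length) && twinEq (a.getD i "") (b.getD i "") then "Yes" else "No")

-- ===== PRECONDITION & SPEC =====
def Spec_twins (a : List String) (b : List String) (out : List String) : Prop := out = twins_alt a b
instance (a : List String) (b : List String) (out : List String) : Decidable (Spec_twins a b out) := by unfold Spec_twins; infer_instance

-- ===== CLAIM (what is proved, stated in full; the proofs are below) =====
def Claim_equal_twins : Prop := ∀ (a : List String) (b : List String), Dom_twins a b → Spec_twins a b (twins a b)

-- ===== LEMMAS AND PROOFS =====

lemma get_count_eq_counter (s : List Char) : get_count s = PySem.Dict.counter s := by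
  rw [← PySem.Dict.foldl_insert_getD_add_one_eq_counter]
  unfold get_count
  apply List.foldl_ext
  intro d c _
  by_cases h : d.contains c
  · simp [h]
  · simp only [Bool.not_eq_true] at h
    simp [h, PySem.Dict.getD_of_not_contains _ _ h]

lemma get?_counter (s : List Char) (c : Char) :
    (PySem.Dict.counter s).get? c = if c ∈ s then some ((s.count c : Int)) else none := by
  by_cases h : c ∈ s
  · rw [if_pos h]
    apply PySem.Dict.get?_of_mem_items
    · rw [PySem.Dict.items_counter]
      exact List.mem_map.mpr ⟨c, (PySem.Set.mem_ofList s c).mpr h, rfl⟩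
    · exact PySem.Dict.nodup_keys_counter s
  · rw [if_neg h, PySem.Dict.get?_eq_none_iff_not_mem_keys, PySem.Dict.keys_counter]
    exact fun hm => h ((PySem.Set.mem_ofList s c).mp hm)

lemma pvDictEq_counter (s1 s2 : List Char) :
    pvDictEq (PySem.Dict.counter s1) (PySem.Dict.counter s2) = true ↔ s1.Perm s2 := by
  rw [List.perm_iff_count]
  unfold pvDictEq
  simp only [Bool.and_eq_true, List.all_eq_true, PySem.Dict.keys_counter, get?_counter]
  constructor
  · rintro ⟨h1, h2⟩ c
    by_cases hc1 : c ∈ s1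
    · have hx := h1 c ((PySem.Set.mem_ofList s1 c).mpr hc1)
      by_cases hc2 : c ∈ s2 <;> simp [hc1, hc2] at hx
      omega
    · by_cases hc2 : c ∈ s2
      · have hx := h2 c ((PySem.Set.mem_ofList s2 c).mpr hc2)
        simp [hc1, hc2] at hx
      · have e1 : s1.count c = 0 := List.count_eq_zero.mpr hc1
        have e2 : s2.count c = 0 := List.count_eq_zero.mpr hc2
        omega
  · intro h
    constructor
    · intro k hk
      have hk1 : k ∈ s1 := (PySem.Set.mem_ofList s1 k).mp hk
      have hk2 : k ∈ s2 := by
        have hc := h k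
        have hp := List.count_pos_iff.mpr hk1
        exact List.count_pos_iff.mp (by omega)
      simp [hk1, hk2, h k]
    · intro k hk
      have hk2 : k ∈ s2 := (PySem.Set.mem_ofList s2 k).mp hk
      have hk1 : k ∈ s1 := by
        have hc := h k
        have hp := List.count_pos_iff.mpr hk2
        exact List.count_pos_iff.mp (by omega)
      simp [hk1, hk2, h k]

lemma pvDictEq_eq_sorted (l1 l2 : List Char) :
    pvDictEq (PySem.Dict.counter l1) (PySem.Dict.counter l2)
      = (PySem.List.sorted l1 (fun c => c) false == PySem.List.sorted l2 (fun c => c) false) := by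
  rw [Bool.eq_iff_iff, pvDictEq_counter, beq_iff_eq, PySem.List.sorted_id_eq_sorted_id_iff_perm]

lemma pvCountsEq_eq_twinEq (x y : String) :
    pvCountsEq (get_counts x) (get_counts y) = twinEq x y := by
  unfold pvCountsEq get_counts twinEq
  simp only [get_count_eq_counter, pvDictEq_eq_sorted]

lemma foldl_appendNo (l : List Int) (arr : List String) :
    l.foldl (fun r _ => r ++ ["No"]) arr = arr ++ l.map (fun _ => "No") := by
  induction l generalizing arr with
  | nil => simp
  | cons x t ih => simp [List.foldl_cons, ih]

lemma length_pyRange_one (n : Nat) : (PySem.List.pyRange 0 ((n : Nat) : Int) 1).length = n := by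
  simp [PySem.List.pyRange]
  omega

lemma go_spec (a b : List String) (rest : List String) :
    ∀ (counter : Nat) (arr : List String),
      counter + rest.length = a.length → rest = a.drop counter → counter ≤ b.length →
      twinsGo a b rest arr counter
        = arr ++ (List.range' counter rest.length).map (fun i =>
            if decide (i < b.length) && twinEq (a.getD i "") (b.getD i "") then "Yes" else "No") := by
  induction rest with
  | nil => intro counter arr _ _ _; simp [twinsGo]
  | cons x t ih =>
    intro counter arr hlen hdrop hb
    simp only [List.length_cons] at hlen
    have hca : counter < a.length := by omega
    simp only [twinsGo, List.length_cons]
    by_cases hbr : a.length ≠ b.length ∧ counter = min a.length b.length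
    · rw [if_pos hbr]
      obtain ⟨hne, hmin⟩ := hbr
      have hbl : b.length = counter := by omega
      have hk : ((a.length : Int) - (b.length : Int)).natAbs = t.length + 1 := by omega
      rw [foldl_appendNo, hk]
      congr 1
      rw [List.map_const']
      have hcg : ∀ i ∈ List.range' counter (t.length + 1),
          (if decide (i < b.length) && twinEq (a.getD i "") (b.getD i "") then "Yes" else "No")
            = "No" := by
        intro i hi
        have h1 : counter ≤ i := (List.mem_range'_1.mp hi).1
        have h2 : ¬ (i < b.length) := by omega
        simp [h2]
      rw [List.map_congr_left hcg, List.map_const', List.length_range',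
        length_pyRange_one (t.length + 1)]
    · rw [if_neg hbr]
      have hor : a.length = b.length ∨ counter ≠ min a.length b.length := by tauto
      have hcb : counter < b.length := by rcases hor with h | h <;> omega
      have hdrop' : t = a.drop (counter + 1) := by
        have h1 : List.drop 1 (x :: t) = List.drop 1 (a.drop counter) := by rw [← hdrop]
        simpa [List.drop_drop] using h1
      rw [pvCountsEq_eq_twinEq, List.range'_succ, List.map_cons]
      have hd : decide (counter < b.length) = true := decide_eq_true hcb
      by_cases ht : twinEq (a.getD counter "") (b.getD counter "") = true
      · rw [if_pos ht, ih (counter + 1) (arr ++ ["Yes"]) (by omega) hdrop' (by omega)]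
        simp only [hd, ht, Bool.true_and]
        simp
      · simp only [Bool.not_eq_true] at ht
        rw [if_neg (by rw [ht]; simp), ih (counter + 1) (arr ++ ["No"]) (by omega) hdrop' (by omega)]
        simp only [hd, ht, Bool.and_false]
        simp

-- ===== VERDICT (by name: the statement is the Claim_ definition above) =====
theorem twins_spec : Claim_equal_twins := by
  intro a b _
  unfold Spec_twins twins twins_alt
  rw [go_spec a b a 0 [] (by simp) (by simp) (by omega), List.range_eq_range']
  simp
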